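-- pv_equiv track=rewrite | github.com/gzabala/cursopython | Ejemplos basicos/funcestudiantes.py | devolverNumCercano
-- ===== SOURCE A (Python) =====
-- def devolverNumCercano(conjunto,numero):
--     i=0
--     listaValor=[]
--     listaResu=[]
--     for d in conjunto:
--         res=abs(numero-d)
--         if (res)>=0:
--             listaValor.append(d)
--             listaResu.append(res)
--         else:
--              return d
--     i+=1
--     valorMinimo=min(listaResu)
--     indiceDelMinimo=listaResu.index(valorMinimo)
--     valorCercano=listaValor[indiceDelMinimo]
--     return valorCercano
-- ===== SOURCE B (Python) =====
-- def devolverNumCercano(conjunto, numero):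
--     best = None
--     bestDist = None
--     for d in conjunto:
--         dist = abs(numero - d)
--         if bestDist is None or dist < bestDist:
--             best, bestDist = d, dist
--     if best is None:
--         raise ValueError("devolverNumCercano: conjunto vacio")
--     return best
-- ===== Notes on version B (the rewrite author's own statement) =====
-- stated objective: simpler
-- what changed: Replaces the build-two-parallel-lists / min / index / lookup pipeline (with a dead res>=0 guard) by a single pass keeping the running closest element (strict < keeps the first on ties).
import Mathlib
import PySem

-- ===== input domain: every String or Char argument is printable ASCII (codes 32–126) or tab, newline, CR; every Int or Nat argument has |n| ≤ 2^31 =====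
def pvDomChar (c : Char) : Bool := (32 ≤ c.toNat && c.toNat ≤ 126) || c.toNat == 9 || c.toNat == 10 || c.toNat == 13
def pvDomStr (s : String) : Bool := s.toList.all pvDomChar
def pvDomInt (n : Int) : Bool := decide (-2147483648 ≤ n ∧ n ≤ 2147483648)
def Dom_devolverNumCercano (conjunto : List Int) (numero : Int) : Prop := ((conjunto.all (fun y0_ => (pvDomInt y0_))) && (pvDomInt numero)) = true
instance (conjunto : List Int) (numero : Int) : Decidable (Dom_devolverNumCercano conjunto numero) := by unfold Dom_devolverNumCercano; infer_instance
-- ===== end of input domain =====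

-- B replaces A's build-two-lists / min / index / lookup pipeline by a single running-best pass; objective: simpler.

-- ===== PORT A =====
-- the for-loop of A, with its (dead, but ported) 'else: return d' early exit
def pvALoop (numero : Int) : List Int → List Int → List Int → Sum Int (List Int × List Int)
  | [], listaValor, listaResu => Sum.inr (listaValor, listaResu)
  | d :: rest, listaValor, listaResu =>
      let res := |numero - d|
      if res ≥ 0 then pvALoop numero rest (listaValor ++ [d]) (listaResu ++ [res])
      else Sum.inl d

def devolverNumCercano (conjunto : List Int) (numero : Int) : Int :=
  match pvALoop numero conjunto [] [] with
  | Sum.inl d => d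
  | Sum.inr (listaValor, listaResu) =>
    match PySem.List.min? listaResu (fun y => y) with
    | none => 0  -- min([]) raises ValueError in Python; excluded by Pre_
    | some valorMinimo =>
      match PySem.List.index? listaResu valorMinimo with
      | none => 0  -- unreachable (ValueError)
      | some indiceDelMinimo => (PySem.List.pyGet? listaValor (indiceDelMinimo : Int)).getD 0

-- ===== PORT B =====
def pvBStep (numero : Int) (st : Option (Int × Int)) (d : Int) : Option (Int × Int) :=
  let dist := |numero - d|
  match st with
  | none => some (d, dist)
  | some (best, bestDist) => if dist < bestDist then some (d, dist) else some (best, bestDist)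

def devolverNumCercano_alt (conjunto : List Int) (numero : Int) : Int :=
  match conjunto.foldl (pvBStep numero) none with
  | none => 0  -- B raises ValueError on empty conjunto; excluded by Pre_
  | some (best, _) => best

-- ===== PRECONDITION & SPEC =====
-- Pre_ excludes only the empty list, on which both A (min([])) and B raise ValueError.
def Pre_devolverNumCercano (conjunto : List Int) (numero : Int) : Prop := conjunto ≠ []
instance (conjunto : List Int) (numero : Int) : Decidable (Pre_devolverNumCercano conjunto numero) := by unfold Pre_devolverNumCercano; infer_instance
def pvWitness_devolverNumCercano : List Int × Int := ([3, -1, 4], 1)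

def Spec_devolverNumCercano (conjunto : List Int) (numero : Int) (out : Int) : Prop := out = devolverNumCercano_alt conjunto numero
instance (conjunto : List Int) (numero : Int) (out : Int) : Decidable (Spec_devolverNumCercano conjunto numero out) := by unfold Spec_devolverNumCercano; infer_instance

-- ===== CLAIM (what is proved, stated in full; the proofs are below) =====
def Claim_equal_devolverNumCercano : Prop := ∀ (conjunto : List Int) (numero : Int), Dom_devolverNumCercano conjunto numero → Pre_devolverNumCercano conjunto numero → Spec_devolverNumCercano conjunto numero (devolverNumCercano conjunto numero)

-- ===== LEMMAS AND PROOFS =====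

-- A's loop never takes the dead else branch: it appends the whole list and its distances.
theorem pvALoop_eq (numero : Int) (xs lv lr : List Int) :
    pvALoop numero xs lv lr = Sum.inr (lv ++ xs, lr ++ xs.map (fun d => |numero - d|)) := by
  induction xs generalizing lv lr with
  | nil => simp [pvALoop]
  | cons d rest ih =>
      simp [pvALoop, abs_nonneg, ih]

-- reference function: first argmin of distance, running from current best b
def pvFam (numero : Int) : Int → List Int → Int
  | b, [] => b
  | b, d :: rest => if |numero - d| < |numero - b| then pvFam numero d rest else pvFam numero b rest

theorem pvB_eq_fam (numero : Int) (xs : List Int) (b : Int) :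
    xs.foldl (pvBStep numero) (some (b, |numero - b|)) =
      some (pvFam numero b xs, |numero - pvFam numero b xs|) := by
  induction xs generalizing b with
  | nil => simp [pvFam]
  | cons d rest ih =>
      by_cases h : |numero - d| < |numero - b|
      · simp [pvBStep, h, pvFam, ih]
      · simp [pvBStep, h, pvFam, ih]

-- A's tail (min / index / lookup) on value list b :: xs
def pvACore (numero b : Int) (xs : List Int) : Int :=
  let lr := |numero - b| :: xs.map (fun d => |numero - d|)
  let lv := b :: xs
  match PySem.List.min? lr (fun y => y) with
  | none => 0
  | some m =>
    match PySem.List.index? lr m with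
    | none => 0
    | some i => (PySem.List.pyGet? lv (i : Int)).getD 0

theorem pvACore_eq_fam (numero : Int) (xs : List Int) (b : Int) :
    pvACore numero b xs = pvFam numero b xs := by
  induction xs generalizing b with
  | nil =>
      simp [pvACore, pvFam, PySem.List.min?_id_cons]
  | cons d rest ih =>
      have hmm : ∀ (a : Int), (rest.map (fun e => |numero - e|)).foldl min a = a ∨
          (rest.map (fun e => |numero - e|)).foldl min a ∈ rest.map (fun e => |numero - e|) :=
        fun a => PySem.List.foldl_min_mem _ a
      have hle : ∀ (a : Int), (rest.map (fun e => |numero - e|)).foldl min a ≤ a :=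
        fun a => (PySem.List.foldl_min_le (rest.map (fun e => |numero - e|)) a).1
      by_cases h : |numero - d| < |numero - b|
      · -- new strict best: whole computation shifts to (d, rest)
        have hmin : min (|numero - b|) (|numero - d|) = |numero - d| := by omega
        have hne : |numero - b| ≠ (rest.map (fun e => |numero - e|)).foldl min (|numero - d|) := by
          have := hle (|numero - d|); omega
        have hmem : (rest.map (fun e => |numero - e|)).foldl min (|numero - d|) ∈
            |numero - d| :: rest.map (fun e => |numero - e|) := by
          rcases hmm (|numero - d|) with h1 | h1
          · rw [h1]; exact List.mem_cons_self
          · exact List.mem_cons_of_mem _ h1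
        obtain ⟨j, hj⟩ := Option.isSome_iff_exists.mp
          ((PySem.List.index?_isSome_iff _ _).2 hmem)
        have key : pvACore numero b (d :: rest) = pvACore numero d rest := by
          simp only [pvACore, List.map_cons]
          rw [PySem.List.min?_id_cons, PySem.List.min?_id_cons]
          simp only [List.foldl_cons, hmin]
          rw [PySem.List.index?_cons_of_ne _ hne, hj]
          simp
        rw [key, ih d]
        simp [pvFam, h]
      · -- keep b: drop d from both the value list and the distance list
        have hdb : |numero - b| ≤ |numero - d| := by omega
        have hmin : min (|numero - b|) (|numero - d|) = |numero - b| := by omega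
        have key : pvACore numero b (d :: rest) = pvACore numero b rest := by
          simp only [pvACore, List.map_cons]
          rw [PySem.List.min?_id_cons, PySem.List.min?_id_cons]
          simp only [List.foldl_cons, hmin]
          by_cases hMb : (rest.map (fun e => |numero - e|)).foldl min (|numero - b|) = |numero - b|
          · rw [hMb, PySem.List.index?_cons_self _ _, PySem.List.index?_cons_self _ _]
            simp
          · have hMle : (rest.map (fun e => |numero - e|)).foldl min (|numero - b|) ≤ |numero - b| :=
              hle _
            have hMd : |numero - d| ≠ (rest.map (fun e => |numero - e|)).foldl min (|numero - b|) := by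
              omega
            have hmem : (rest.map (fun e => |numero - e|)).foldl min (|numero - b|) ∈
                rest.map (fun e => |numero - e|) := by
              rcases hmm (|numero - b|) with h1 | h1
              · exact absurd h1 hMb
              · exact h1
            obtain ⟨j, hj⟩ := Option.isSome_iff_exists.mp
              ((PySem.List.index?_isSome_iff _ _).2 hmem)
            rw [PySem.List.index?_cons_of_ne _ (fun he => hMb he.symm),
                PySem.List.index?_cons_of_ne _ hMd,
                PySem.List.index?_cons_of_ne _ (fun he => hMb he.symm), hj]
            simp only [Option.map_some]
            rw [PySem.List.pyGet?_natCast, PySem.List.pyGet?_natCast]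
            simp
        rw [key, ih b]
        simp [pvFam, h]

-- ===== VERDICT (by name: the statement is the Claim_ definition above) =====
theorem devolverNumCercano_spec : Claim_equal_devolverNumCercano := by
  intro conjunto numero _ hpre
  unfold Spec_devolverNumCercano
  match conjunto with
  | [] => exact absurd rfl hpre
  | b :: xs =>
      have hA : devolverNumCercano (b :: xs) numero = pvACore numero b xs := by
        unfold devolverNumCercano
        rw [pvALoop_eq]
        rfl
      have hB : devolverNumCercano_alt (b :: xs) numero = pvFam numero b xs := by
        unfold devolverNumCercano_alt
        have : (b :: xs).foldl (pvBStep numero) none =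
            xs.foldl (pvBStep numero) (some (b, |numero - b|)) := by
          simp [pvBStep]
        rw [this, pvB_eq_fam]
      rw [hA, hB, pvACore_eq_fam]
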